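-- pv_equiv track=rewrite | github.com/leminhba/NLP-project | main/util.py | fix_continuous_paragraph
-- ===== SOURCE A (Python) =====
-- def fix_continuous_paragraph(content):
--     '''
--     :param content: content of file, original text - not lower
--     :return: text with modified_paragraph
--     '''
--     list_result = []
--     list_para = content.split('\n')
--     i = 0
--     while i < len(list_para):
--         current_para = list_para[i]
--         if i == len(list_para) - 1:
--             list_result.append(current_para)
--             break
--
--         j = i + 1
--         # remain_list = list_para[j:]
--         while j < len(list_para):
--             next_para = list_para[j]
--             if next_para is None or len(next_para) == 0:
--                 j += 1
--             elif next_para[0].islower():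
--                 current_para = f'{current_para} {next_para}'
--                 j += 1
--             else:
--                 break
--         list_result.append(current_para)
--         i = j
--     return '\n'.join(list_result)
-- ===== SOURCE B (Python) =====
-- def fix_continuous_paragraph(content):
--     lines = content.split('\n')
--     out = []
--     cur = lines[0]
--     for line in lines[1:]:
--         if line == '':
--             continue
--         if line[0].islower():
--             cur = f'{cur} {line}'
--         else:
--             out.append(cur)
--             cur = line
--     out.append(cur)
--     return '\n'.join(out)
-- ===== Notes on version B (the rewrite author's own statement) =====
-- stated objective: simpler
-- what changed: Replaced A's nested index-driven while-loops (inner loop re-scanning forward with j and outer loop jumping i to j) by one flat accumulator pass over the split lines that either extends the current paragraph or flushes it.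
import Mathlib
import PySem

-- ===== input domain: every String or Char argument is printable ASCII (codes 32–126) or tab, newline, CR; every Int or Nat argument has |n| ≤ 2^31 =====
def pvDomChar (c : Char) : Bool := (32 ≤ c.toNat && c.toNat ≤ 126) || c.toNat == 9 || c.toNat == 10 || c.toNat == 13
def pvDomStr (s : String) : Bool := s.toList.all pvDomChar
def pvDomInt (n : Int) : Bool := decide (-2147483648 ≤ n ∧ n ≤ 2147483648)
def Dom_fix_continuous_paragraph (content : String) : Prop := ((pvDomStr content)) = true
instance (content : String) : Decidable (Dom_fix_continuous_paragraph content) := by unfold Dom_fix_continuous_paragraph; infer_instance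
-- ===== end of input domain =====

-- B replaces A's nested index-driven while-loops by one flat accumulator pass over the split lines (objective: simpler).

-- ===== PORT A =====
-- A's inner `while j < len(list_para)` loop: skip empty lines, merge lowercase-starting
-- lines into `current_para`, stop at the first other line; returns (current_para, j).
-- Fuel (first Nat argument) only makes the recursion structural; it is always supplied
-- as L.length - j, which the j-increments never exhaust, so the guard `j < L.length`
-- decides every exit exactly as in the Python.
-- `next_para is None` is never true for results of str.split and is ported away;
-- `next_para[0]` is only evaluated when len(next_para) > 0, ported as headI (exact there).
def pvInnerA (L : List (List Char)) : Nat → Nat → List Char → List Char × Nat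
  | 0, j, cur => (cur, j)
  | k+1, j, cur =>
    if h : j < L.length then
      let next := L[j]
      if next.length = 0 then pvInnerA L k (j+1) cur
      else if PySem.Chars.islower next.headI then pvInnerA L k (j+1) (cur ++ ' ' :: next)
      else (cur, j)
    else (cur, j)

-- A's outer `while i < len(list_para)` loop with its `i == len-1` early break; fuel
-- L.length is enough because i advances by at least 1 per iteration.
def pvOuterA (L : List (List Char)) : Nat → Nat → List (List Char) → List (List Char)
  | 0, _, acc => acc
  | k+1, i, acc =>
    if h : i < L.length then
      let cur := L[i]
      if i = L.length - 1 then acc ++ [cur]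
      else
        let p := pvInnerA L (L.length - (i+1)) (i+1) cur
        pvOuterA L k p.2 (acc ++ [p.1])
    else acc

def fix_continuous_paragraph (content : String) : String :=
  let L := PySem.Chars.splitOn content.toList ['\n']
  String.ofList (PySem.Chars.join ['\n'] (pvOuterA L L.length 0 []))

-- ===== PORT B =====
-- one step of Source B's single for-loop over lines[1:], state = (out, cur)
def pvStepB (s : List (List Char) × List Char) (line : List Char) : List (List Char) × List Char :=
  if line.length = 0 then s
  else if PySem.Chars.islower line.headI then (s.1, s.2 ++ ' ' :: line)
  else (s.1 ++ [s.2], line)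

def fix_continuous_paragraph_alt (content : String) : String :=
  match PySem.Chars.splitOn content.toList ['\n'] with
  | [] => ""   -- unreachable: str.split never returns an empty list
  | c0 :: rest =>
    let p := rest.foldl pvStepB ([], c0)
    String.ofList (PySem.Chars.join ['\n'] (p.1 ++ [p.2]))

-- ===== PRECONDITION & SPEC =====
def Spec_fix_continuous_paragraph (content : String) (out : String) : Prop := out = fix_continuous_paragraph_alt content
instance (content : String) (out : String) : Decidable (Spec_fix_continuous_paragraph content out) := by unfold Spec_fix_continuous_paragraph; infer_instance

-- ===== CLAIM (what is proved, stated in full; the proofs are below) =====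
def Claim_equal_fix_continuous_paragraph : Prop := ∀ (content : String), Dom_fix_continuous_paragraph content → Spec_fix_continuous_paragraph content (fix_continuous_paragraph content)

-- ===== LEMMAS AND PROOFS =====

-- common recursive specification of the merged paragraph list, starting from current
-- paragraph `cur` with `rest` lines still to process
def pvGo (cur : List Char) (rest : List (List Char)) : List (List Char) :=
  match rest with
  | [] => [cur]
  | l :: ls =>
    if l.length = 0 then pvGo cur ls
    else if PySem.Chars.islower l.headI then pvGo (cur ++ ' ' :: l) ls
    else cur :: pvGo l ls

theorem pvB_key (rest : List (List Char)) : ∀ (out : List (List Char)) (cur : List Char),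
    (rest.foldl pvStepB (out, cur)).1 ++ [(rest.foldl pvStepB (out, cur)).2]
      = out ++ pvGo cur rest := by
  induction rest with
  | nil => intro out cur; simp [pvGo]
  | cons l ls ih =>
    intro out cur
    by_cases h0 : l.length = 0
    · simp [List.foldl_cons, pvStepB, pvGo, h0, ih]
    · by_cases hl : PySem.Chars.islower l.headI
      · simp [List.foldl_cons, pvStepB, pvGo, h0, hl, ih]
      · simp [List.foldl_cons, pvStepB, pvGo, h0, hl, ih]

theorem pvA_key (L : List (List Char)) (k : Nat) : ∀ (j : Nat), L.length - j ≤ k →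
    ∀ (cur : List Char) (acc : List (List Char)) (f : Nat), L.length - j ≤ f →
    pvOuterA L f (pvInnerA L (L.length - j) j cur).2 (acc ++ [(pvInnerA L (L.length - j) j cur).1])
      = acc ++ pvGo cur (L.drop j) := by
  induction k with
  | zero =>
    intro j hj cur acc f _
    have hge : L.length ≤ j := by omega
    have h0 : L.length - j = 0 := by omega
    rw [h0, pvInnerA]
    cases f with
    | zero => simp [pvOuterA, List.drop_eq_nil_of_le hge, pvGo]
    | succ f => rw [pvOuterA, dif_neg (by omega)]
                simp [List.drop_eq_nil_of_le hge, pvGo]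
  | succ k ih =>
    intro j hj cur acc f hf
    by_cases h : j < L.length
    · rw [List.drop_eq_getElem_cons h]
      have hsf : L.length - j = (L.length - (j+1)) + 1 := by omega
      rw [hsf, pvInnerA, dif_pos h]
      by_cases h0 : L[j].length = 0
      · rw [if_pos h0, pvGo, if_pos h0]
        exact ih (j+1) (by omega) cur acc f (by omega)
      · by_cases hl : PySem.Chars.islower L[j].headI
        · rw [if_neg h0, if_pos hl, pvGo, if_neg h0, if_pos hl]
          exact ih (j+1) (by omega) (cur ++ ' ' :: L[j]) acc f (by omega)
        · rw [if_neg h0, if_neg hl, pvGo, if_neg h0, if_neg hl]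
          obtain ⟨f', rfl⟩ : ∃ f', f = f' + 1 := ⟨f - 1, by omega⟩
          rw [pvOuterA, dif_pos h]
          by_cases hlast : j = L.length - 1
          · rw [if_pos hlast]
            have hd : L.drop (j+1) = [] := List.drop_eq_nil_of_le (by omega)
            simp [hd, pvGo]
          · rw [if_neg hlast]
            have := ih (j+1) (by omega) L[j] (acc ++ [cur]) f' (by omega)
            simpa using this
    · have h0 : L.length - j = 0 := by omega
      rw [h0, pvInnerA]
      cases f with
      | zero => simp [pvOuterA, List.drop_eq_nil_of_le (by omega : L.length ≤ j), pvGo]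
      | succ f => rw [pvOuterA, dif_neg h]
                  simp [List.drop_eq_nil_of_le (by omega : L.length ≤ j), pvGo]

theorem pv_main (c0 : List Char) (rest : List (List Char)) :
    pvOuterA (c0 :: rest) (rest.length + 1) 0 []
      = (rest.foldl pvStepB ([], c0)).1 ++ [(rest.foldl pvStepB ([], c0)).2] := by
  rw [pvB_key]
  cases rest with
  | nil => simp [pvOuterA, pvGo]
  | cons l ls =>
    show pvOuterA (c0 :: l :: ls) ((l :: ls).length + 1) 0 [] = _
    rw [pvOuterA, dif_pos (by simp), if_neg (by simp)]
    have h1 : (c0 :: l :: ls).length - 1 = (l :: ls).length := by simp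
    have := pvA_key (c0 :: l :: ls) (c0 :: l :: ls).length 1 (by simp)
      c0 [] (l :: ls).length (by simp)
    rw [h1] at this ⊢
    simpa using this

-- ===== VERDICT (by name: the statement is the Claim_ definition above) =====
theorem fix_continuous_paragraph_spec : Claim_equal_fix_continuous_paragraph := by
  intro content _
  unfold Spec_fix_continuous_paragraph fix_continuous_paragraph fix_continuous_paragraph_alt
  cases hL : PySem.Chars.splitOn content.toList ['\n'] with
  | nil => simp [pvOuterA, PySem.Chars.join, List.intercalate]
  | cons c0 rest => simp [pv_main c0 rest]
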